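-- pv_equiv track=rewrite | github.com/irupawala/Ibrahim-List | Ibrahim Personal/Ready/ADMSU/GAPC/Programming Assignments/Week 1/Question 2/[4] Overlap_finding_methods.py | find_overlap_naive_while
-- ===== SOURCE A (Python) =====
-- def find_overlap_naive_while(node, neighbor):
--     min_overlap_len = 4
--     overlap_string = neighbor[0:min_overlap_len]
--     error_limit = 0
--     start = 0
--
--     while start < len(node) - min_overlap_len:
--         error_counter = 0
--         start_counter = start
--
--         overlap_index = 0
--         while overlap_index < min_overlap_len:
--             if error_counter > error_limit:
--                 break
--             if node[start_counter] is not overlap_string[overlap_index]: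
--                 error_counter +=1
--             overlap_index += 1
--             start_counter += 1
--
--         if error_counter <= error_limit:
--             while start_counter < len(node):
--                 if error_counter > error_limit:
--                     break
--                 if node[start_counter] is not neighbor[overlap_index]:
--                     error_counter +=1
--                 overlap_index += 1
--                 start_counter += 1
--
--         if error_counter <= error_limit:
--             return (start, len(node)-start)
--         start += 1
--
--     return(-1, 0)
-- ===== SOURCE B (Python) =====
-- def find_overlap_naive_while(node, neighbor):
--     # Scan candidate overlap lengths from longest to shortest; the first hit is
--     # the smallest start, i.e. exactly what A's ascending start scan returns.
--     n = len(node)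
--     for L in range(n, 4, -1):
--         if neighbor.startswith(node[n - L:]):
--             return (n - L, L)
--     return (-1, 0)
-- ===== Notes on version B (the rewrite author's own statement) =====
-- stated objective: faster
-- what changed: B scans candidate overlap lengths from longest to shortest and tests each candidate with a single C-speed startswith/slice comparison, replacing A's three nested while-loops with per-character Python-level comparisons and error counters.
import Mathlib
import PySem

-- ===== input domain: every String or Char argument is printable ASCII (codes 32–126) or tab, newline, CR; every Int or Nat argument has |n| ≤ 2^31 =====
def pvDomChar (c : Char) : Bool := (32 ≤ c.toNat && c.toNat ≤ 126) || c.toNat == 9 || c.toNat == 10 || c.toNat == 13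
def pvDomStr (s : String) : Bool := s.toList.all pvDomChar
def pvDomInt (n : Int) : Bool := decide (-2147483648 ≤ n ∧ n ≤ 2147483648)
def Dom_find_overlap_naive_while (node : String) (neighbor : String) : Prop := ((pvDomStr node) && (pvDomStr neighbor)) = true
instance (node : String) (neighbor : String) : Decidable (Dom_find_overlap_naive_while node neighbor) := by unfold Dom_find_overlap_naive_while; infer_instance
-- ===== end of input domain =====

-- B replaces A's three nested while-loops (per-character comparison with an error
-- counter, in a 4-char phase followed by a rest phase) by a single descending scan
-- over candidate overlap lengths, each tested with one startswith comparison;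
-- objective: simpler.  On Dom, Python's `is not` on 1-char strings is `!=` (interning).

-- ===== PORT A =====
-- inner while-loop 1: `while overlap_index < min_overlap_len: ...`.
-- Counters are Python non-negative ints, kept as Nat; indexing via pyGet?,
-- none = IndexError (propagated; such inputs are excluded by Pre_).
-- The fuel argument (4 - overlap_index at the call site) only makes the loop total.
def pvLoop1 (a ov : List Char) : Nat → Nat → Nat → Nat → Option (Nat × Nat × Nat)
  | 0, ec, sc, oi => some (ec, sc, oi)
  | fuel + 1, ec, sc, oi =>
    if oi < 4 then
      if 0 < ec then some (ec, sc, oi)      -- `if error_counter > error_limit: break`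
      else
        match PySem.List.pyGet? a (sc : Int), PySem.List.pyGet? ov (oi : Int) with
        | some ca, some co => pvLoop1 a ov fuel (if ca ≠ co then ec + 1 else ec) (sc + 1) (oi + 1)
        | _, _ => none
    else some (ec, sc, oi)

-- inner while-loop 2: `while start_counter < len(node): ...` (fuel: len(node) suffices)
def pvLoop2 (a b : List Char) : Nat → Nat → Nat → Nat → Option (Nat × Nat × Nat)
  | 0, ec, sc, oi => some (ec, sc, oi)
  | fuel + 1, ec, sc, oi =>
    if sc < a.length then
      if 0 < ec then some (ec, sc, oi)
      else
        match PySem.List.pyGet? a (sc : Int), PySem.List.pyGet? b (oi : Int) with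
        | some ca, some cb => pvLoop2 a b fuel (if ca ≠ cb then ec + 1 else ec) (sc + 1) (oi + 1)
        | _, _ => none
    else some (ec, sc, oi)

-- one outer-loop iteration body: loop1, then (if no error) loop2; final state or crash
def pvStep (a b ov : List Char) (start : Nat) : Option (Nat × Nat × Nat) :=
  match pvLoop1 a ov 4 0 start 0 with
  | none => none
  | some (ec, sc, oi) => if ec ≤ 0 then pvLoop2 a b a.length ec sc oi else some (ec, sc, oi)

-- outer while-loop: `while start < len(node) - min_overlap_len` (fuel: len(node) suffices)
def pvOuter (a b ov : List Char) : Nat → Nat → List Int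
  | 0, _ => [-1, 0]
  | fuel + 1, start =>
    if start < a.length - 4 then
      match pvStep a b ov start with
      | none => [-1, 0]   -- IndexError in Python; such inputs are excluded by Pre_
      | some (ec, _, _) =>
        if ec ≤ 0 then [(start : Int), (a.length : Int) - (start : Int)]
        else pvOuter a b ov fuel (start + 1)
    else [-1, 0]

def find_overlap_naive_while (node : String) (neighbor : String) : List Int :=
  pvOuter node.toList neighbor.toList
    (PySem.List.slice neighbor.toList (some 0) (some 4))   -- overlap_string = neighbor[0:4]
    node.toList.length 0

-- ===== PORT B =====
-- `for L in range(n, 4, -1)` as a structural countdown on L;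
-- node[n-L:] with 0 ≤ n-L ≤ n is drop (n-L) (exact)
def pvScan (a b : List Char) : Nat → List Int
  | 0 => [-1, 0]
  | L + 1 =>
    if 4 < L + 1 then
      if PySem.Chars.startswith b (a.drop (a.length - (L + 1))) then
        [((a.length - (L + 1) : Nat) : Int), ((L + 1 : Nat) : Int)]
      else pvScan a b L
    else [-1, 0]

def find_overlap_naive_while_alt (node : String) (neighbor : String) : List Int :=
  pvScan node.toList neighbor.toList node.toList.length

-- ===== PRECONDITION & SPEC =====
-- A succeeds at s when the suffix node[s:] is a prefix of neighbor
abbrev pvSuccessAt (a b : List Char) (s : Nat) : Prop := a.drop s <+: b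
-- A crashes (IndexError) at a reached s when all of neighbor matches inside node
-- with characters of node left over
abbrev pvCrashAt (a b : List Char) (s : Nat) : Prop :=
  s + b.length < a.length ∧ b <+: a.drop s
-- Pre_ excludes exactly the inputs on which A raises IndexError: those where some
-- scanned start fully matches neighbor inside node (with room after) before any
-- successful overlap.
def Pre_find_overlap_naive_while (node : String) (neighbor : String) : Prop :=
  ∀ s, s < node.toList.length - 4 → pvCrashAt node.toList neighbor.toList s →
    ∃ s' < s, pvSuccessAt node.toList neighbor.toList s'
instance (node : String) (neighbor : String) : Decidable (Pre_find_overlap_naive_while node neighbor) := by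
  unfold Pre_find_overlap_naive_while; infer_instance
def pvWitness_find_overlap_naive_while : String × String := ("abcdefgh", "defgh")

def Spec_find_overlap_naive_while (node : String) (neighbor : String) (out : List Int) : Prop := out = find_overlap_naive_while_alt node neighbor
instance (node : String) (neighbor : String) (out : List Int) : Decidable (Spec_find_overlap_naive_while node neighbor out) := by unfold Spec_find_overlap_naive_while; infer_instance

-- ===== CLAIM (what is proved, stated in full; the proofs are below) =====
def Claim_equal_find_overlap_naive_while : Prop := ∀ (node : String) (neighbor : String), Dom_find_overlap_naive_while node neighbor → Pre_find_overlap_naive_while node neighbor → Spec_find_overlap_naive_while node neighbor (find_overlap_naive_while node neighbor)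


-- ===== LEMMAS AND PROOFS =====

-- reference classification of one iteration: compare a[sc+i] with b[oi+i] until the
-- end of a; none = index past b (A's IndexError), some true = matched to end of a
def pvCmp (a b : List Char) (sc oi : Nat) : Option Bool :=
  if h : sc < a.length then
    match b[oi]? with
    | none => none
    | some cb => if a[sc]'h ≠ cb then some false else pvCmp a b (sc + 1) (oi + 1)
  else some true
termination_by a.length - sc

def pvCl (r : Option (Nat × Nat × Nat)) : Option Bool := r.map (fun q => q.1 == 0)

theorem pvLoop1_pos (a ov : List Char) (fuel ec sc oi : Nat) (h : 0 < ec) :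
    pvLoop1 a ov fuel ec sc oi = some (ec, sc, oi) := by
  cases fuel with
  | zero => rfl
  | succ k => rw [pvLoop1]; split <;> simp [h]

theorem pvLoop2_pos (a b : List Char) (fuel ec sc oi : Nat) (h : 0 < ec) :
    pvLoop2 a b fuel ec sc oi = some (ec, sc, oi) := by
  cases fuel with
  | zero => rfl
  | succ k => rw [pvLoop2]; split <;> simp [h]

theorem pvLoop2_bridge (a b : List Char) :
    ∀ fuel sc oi, a.length - sc ≤ fuel →
      pvCl (pvLoop2 a b fuel 0 sc oi) = pvCmp a b sc oi := by
  intro fuel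
  induction fuel with
  | zero =>
    intro sc oi hf
    have hsc : ¬ sc < a.length := by omega
    rw [pvLoop2, pvCmp]; simp [hsc, pvCl]
  | succ k ih =>
    intro sc oi hf
    by_cases hsc : sc < a.length
    · rw [pvLoop2, pvCmp]
      simp only [hsc, dif_pos, if_pos, Nat.lt_irrefl, if_false,
        PySem.List.pyGet?_natCast]
      rw [List.getElem?_eq_getElem hsc]
      cases hb : b[oi]? with
      | none => simp [pvCl]
      | some cb =>
        simp only
        by_cases hne : a[sc] ≠ cb
        · rw [if_pos hne, if_pos hne, pvLoop2_pos _ _ _ _ _ _ (by omega)]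
          simp [pvCl]
        · rw [if_neg hne, if_neg hne]
          exact ih (sc + 1) (oi + 1) (by omega)
    · rw [pvLoop2, pvCmp]; simp [hsc, pvCl]

theorem pvLoop1_bridge (a b : List Char) :
    ∀ fuel oi sc, 4 - oi ≤ fuel → oi ≤ 4 → sc + (4 - oi) ≤ a.length →
      pvCl (match pvLoop1 a (b.take 4) fuel 0 sc oi with
            | none => none
            | some (ec, sc', oi') =>
                if ec ≤ 0 then pvLoop2 a b a.length ec sc' oi' else some (ec, sc', oi'))
        = pvCmp a b sc oi := by
  intro fuel
  induction fuel with
  | zero =>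
    intro oi sc hf hoi hn
    have h4 : oi = 4 := by omega
    subst h4
    rw [pvLoop1]
    simpa using pvLoop2_bridge a b (a.length) sc 4 (by omega)
  | succ k ih =>
    intro oi sc hf hoi hn
    by_cases h4 : oi < 4
    · have hsc : sc < a.length := by omega
      rw [pvLoop1, pvCmp, dif_pos hsc]
      simp only [h4, if_pos, Nat.lt_irrefl, if_false,
        PySem.List.pyGet?_natCast]
      rw [List.getElem?_eq_getElem hsc, List.getElem?_take, if_pos h4]
      cases hb : b[oi]? with
      | none => simp [pvCl]
      | some cb =>
        simp only
        by_cases hne : a[sc] ≠ cb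
        · rw [if_pos hne, if_pos hne, pvLoop1_pos _ _ _ _ _ _ (by omega)]
          simp [pvCl]
        · rw [if_neg hne, if_neg hne]
          exact ih (oi + 1) (sc + 1) (by omega) (by omega) (by omega)
    · have h4' : oi = 4 := by omega
      subst h4'
      rw [pvLoop1]
      simp only [Nat.lt_irrefl, if_false]
      simpa using pvLoop2_bridge a b (a.length) sc 4 (by omega)

theorem pvStep_bridge (a b : List Char) (s : Nat) (hs : s + 4 ≤ a.length) :
    pvCl (pvStep a b (b.take 4) s) = pvCmp a b s 0 := by
  have := pvLoop1_bridge a b 4 0 s (by omega) (by omega) (by omega)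
  rw [pvStep]
  cases h1 : pvLoop1 a (b.take 4) 4 0 s 0 with
  | none => rw [h1] at this; simpa using this
  | some p =>
    obtain ⟨ec, sc, oi⟩ := p
    rw [h1] at this
    simpa using this

theorem pvCmp_spec (a b : List Char) :
    ∀ fuel sc oi, a.length - sc ≤ fuel →
      pvCmp a b sc oi =
        if b.drop oi <+: a.drop sc ∧ sc + (b.length - oi) < a.length then none
        else if a.drop sc <+: b.drop oi then some true else some false := by
  intro fuel
  induction fuel with
  | zero =>
    intro sc oi hf
    have hsc : ¬ sc < a.length := by omega
    have hd : a.drop sc = [] := List.drop_eq_nil_of_le (by omega)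
    rw [pvCmp, dif_neg hsc, if_neg (by rintro ⟨-, h2⟩; omega),
      if_pos (by rw [hd]; exact List.nil_prefix)]
  | succ k ih =>
    intro sc oi hf
    by_cases hsc : sc < a.length
    · rw [pvCmp]
      have hda : a.drop sc = a[sc] :: a.drop (sc + 1) := List.drop_eq_getElem_cons hsc
      simp only [hsc, dif_pos]
      cases hb : b[oi]? with
      | none =>
        have hoi : b.length ≤ oi := by
          by_contra hlt
          exact absurd hb (by simp [List.getElem?_eq_getElem (show oi < b.length by omega)])
        have hdb : b.drop oi = [] := List.drop_eq_nil_of_le hoi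
        rw [if_pos ⟨by rw [hdb]; exact List.nil_prefix, by omega⟩]
      | some cb =>
        have hoi : oi < b.length := by
          by_contra hge
          rw [List.getElem?_eq_none (by omega)] at hb; exact absurd hb (by simp)
        have hcb : b[oi] = cb := by
          have := List.getElem?_eq_getElem hoi
          rw [hb] at this; exact (Option.some.injEq _ _).mp this.symm
        have hdb : b.drop oi = cb :: b.drop (oi + 1) := by
          rw [List.drop_eq_getElem_cons hoi, hcb]
        simp only
        by_cases hne : a[sc] ≠ cb
        · rw [if_pos hne, hda, hdb]
          have h1 : ¬ (cb :: b.drop (oi + 1) <+: a[sc] :: a.drop (sc + 1)) := by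
            intro hp
            rcases List.cons_prefix_cons.mp hp with ⟨he, _⟩
            exact hne he.symm
          have h2 : ¬ (a[sc] :: a.drop (sc + 1) <+: cb :: b.drop (oi + 1)) := by
            intro hp
            rcases List.cons_prefix_cons.mp hp with ⟨he, _⟩
            exact hne he
          rw [if_neg (by rintro ⟨hp, -⟩; exact h1 hp), if_neg h2]
        · have he : a[sc] = cb := not_ne_iff.mp hne
          rw [if_neg hne, ih (sc + 1) (oi + 1) (by omega), hda, hdb, he]
          have harith : sc + (b.length - oi) = sc + 1 + (b.length - (oi + 1)) := by omega
          simp [List.cons_prefix_cons, harith]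
    · have hd : a.drop sc = [] := List.drop_eq_nil_of_le (by omega)
      rw [pvCmp, dif_neg hsc, if_neg (by rintro ⟨-, h2⟩; omega),
        if_pos (by rw [hd]; exact List.nil_prefix)]

theorem pvScan_le4 (a b : List Char) (L : Nat) (h : ¬ 4 < L) : pvScan a b L = [-1, 0] := by
  cases L with
  | zero => rfl
  | succ L' => rw [pvScan, if_neg h]

theorem pvMain (a b : List Char) (hpre : ∀ s, s < a.length - 4 → pvCrashAt a b s →
      ∃ s' < s, pvSuccessAt a b s') :
    ∀ fuel s, a.length - 4 - s ≤ fuel →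
      (∀ s' < s, ¬ pvSuccessAt a b s') →
      pvOuter a b (b.take 4) fuel s = pvScan a b (a.length - s) := by
  intro fuel
  induction fuel with
  | zero =>
    intro s hf hns
    rw [pvOuter, pvScan_le4 a b _ (by omega)]
  | succ k ih =>
    intro s hf hns
    by_cases hs : s < a.length - 4
    · have hs4 : s + 4 ≤ a.length := by omega
      have hncr : ¬ pvCrashAt a b s := by
        intro hcr
        obtain ⟨s', hlt, hsc⟩ := hpre s hs hcr
        exact hns s' hlt hsc
      have hcmp := pvCmp_spec a b (a.length) s 0 (by omega)
      simp only [List.drop_zero, Nat.sub_zero] at hcmp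
      have hcmp2 : pvCmp a b s 0 =
          (if a.drop s <+: b then some true else some false : Option Bool) :=
        hcmp.trans (if_neg (by rintro ⟨h1, h2⟩; exact hncr ⟨by omega, h1⟩))
      have hbr := pvStep_bridge a b s hs4
      rw [hcmp2] at hbr
      have hL : 4 < a.length - s := by omega
      obtain ⟨L', hL'⟩ : ∃ L', a.length - s = L' + 1 := ⟨a.length - s - 1, by omega⟩
      have hLs : a.length - (L' + 1) = s := by omega
      rw [pvOuter, if_pos hs, hL', pvScan, if_pos (by omega), hLs]
      by_cases hsucc : List.drop s a <+: b
      · rw [if_pos ((PySem.Chars.startswith_iff b (a.drop s)).mpr hsucc)]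
        cases hst : pvStep a b (b.take 4) s with
        | none => rw [hst] at hbr; simp [pvCl, hsucc] at hbr
        | some q =>
          obtain ⟨ec, sc, oi⟩ := q
          rw [hst] at hbr
          simp only [pvCl, Option.map_some, if_pos hsucc, Option.some.injEq] at hbr
          have hec : ec = 0 := by simpa using hbr
          dsimp only
          rw [if_pos (by omega)]
          have hcast : ((L' + 1 : Nat) : Int) = (a.length : Int) - (s : Int) := by omega
          rw [hcast]
      · rw [if_neg (fun hsw => hsucc ((PySem.Chars.startswith_iff b (a.drop s)).mp hsw))]
        cases hst : pvStep a b (b.take 4) s with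
        | none => rw [hst] at hbr; simp [pvCl, hsucc] at hbr
        | some q =>
          obtain ⟨ec, sc, oi⟩ := q
          rw [hst] at hbr
          simp only [pvCl, Option.map_some, if_neg hsucc, Option.some.injEq] at hbr
          have hec : ¬ ec = 0 := by simpa using hbr
          dsimp only
          rw [if_neg (by omega), show L' = a.length - (s + 1) from by omega]
          exact ih (s + 1) (by omega) (by
            intro s' hlt
            rcases Nat.lt_succ_iff_lt_or_eq.mp hlt with h | h
            · exact hns s' h
            · subst h; exact hsucc)
    · rw [pvOuter, if_neg hs, pvScan_le4 a b _ (by omega)]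

theorem pvSlice04 (b : List Char) :
    PySem.List.slice b (some 0) (some 4) = b.take 4 := by
  simp [PySem.List.slice]

-- ===== VERDICT (by name: the statement is the Claim_ definition above) =====
theorem find_overlap_naive_while_spec : Claim_equal_find_overlap_naive_while := by
  intro node neighbor _ hpre
  unfold Spec_find_overlap_naive_while find_overlap_naive_while find_overlap_naive_while_alt
  rw [pvSlice04]
  simpa using pvMain node.toList neighbor.toList hpre (node.toList.length) 0 (by omega)
    (by intro s' h; omega)
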